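-- pv_equiv track=rewrite | github.com/michaelkimm/Algorithm-problem-solving-thought-process-re-record | Python/n3.py | subsequenceAvailable
-- ===== SOURCE A (Python) =====
-- def subsequenceAvailable(sourceStr, targetStr, targetStrFoundIdxSet, checkStartIdx):
--     sourceCharIdx = checkStartIdx
--     matchCnt = 0
--     for targetChar in targetStr:
--         for idx in range(sourceCharIdx, len(sourceStr)):
--             if targetChar == sourceStr[idx]:
--                 matchCnt += 1
--                 sourceCharIdx = idx + 1
--                 targetStrFoundIdxSet.add(idx)
--                 break
--
--     return True if matchCnt == len(targetStr) else False
-- ===== SOURCE B (Python) =====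
-- def subsequenceAvailable(sourceStr, targetStr, targetStrFoundIdxSet, checkStartIdx):
--     # Index every character's occurrence positions once; a per-character cursor
--     # into its occurrence list then advances monotonically (the match cursor pos
--     # never decreases), so each occurrence list is traversed at most once.
--     positions = {}
--     for i, ch in enumerate(sourceStr):
--         positions.setdefault(ch, []).append(i)
--     cursors = {}
--     pos = checkStartIdx
--     matchCnt = 0
--     for c in targetStr:
--         lst = positions.get(c)
--         if lst is None:
--             continue
--         k = cursors.get(c, 0)
--         while k < len(lst) and lst[k] < pos:
--             k += 1
--         cursors[c] = k
--         if k < len(lst):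
--             p = lst[k]
--             matchCnt += 1
--             pos = p + 1
--             targetStrFoundIdxSet.add(p)
--     return matchCnt == len(targetStr)
-- ===== Notes on version B (the rewrite author's own statement) =====
-- stated objective: alternative
-- what changed: B builds a per-character occurrence index of sourceStr once and advances a per-character cursor through each occurrence list (the match cursor never decreases), instead of A's rescan of sourceStr from the match cursor for every target character.
-- outside the precondition, e.g. on subsequenceAvailable('ab', 'ba', set(), -1): A returns True, B returns False
-- crash fix: When targetStr is nonempty and checkStartIdx < -len(sourceStr), A raises IndexError on its first lookup sourceStr[checkStartIdx]; B returns the ordinary subsequence answer (cursor before every occurrence). — e.g. on subsequenceAvailable("a", "a", [], -5): A raises IndexError, B returns true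
import Mathlib
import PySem

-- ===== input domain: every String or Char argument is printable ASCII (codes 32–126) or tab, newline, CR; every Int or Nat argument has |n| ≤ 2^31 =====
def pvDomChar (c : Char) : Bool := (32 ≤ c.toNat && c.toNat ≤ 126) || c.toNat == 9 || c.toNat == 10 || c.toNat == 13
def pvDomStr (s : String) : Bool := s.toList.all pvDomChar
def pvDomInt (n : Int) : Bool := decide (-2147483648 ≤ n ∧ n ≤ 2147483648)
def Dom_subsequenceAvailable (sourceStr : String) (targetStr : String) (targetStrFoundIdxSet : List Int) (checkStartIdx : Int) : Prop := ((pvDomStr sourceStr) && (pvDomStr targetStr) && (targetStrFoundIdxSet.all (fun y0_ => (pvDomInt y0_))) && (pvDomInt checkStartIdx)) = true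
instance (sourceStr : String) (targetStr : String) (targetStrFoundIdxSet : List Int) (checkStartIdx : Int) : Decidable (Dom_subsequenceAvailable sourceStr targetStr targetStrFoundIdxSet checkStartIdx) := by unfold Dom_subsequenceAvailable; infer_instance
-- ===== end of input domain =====

-- B replaces A's per-target-character rescan of sourceStr with a per-character occurrence
-- index built once, advanced by monotone per-character cursors. Both A and B mutate
-- targetStrFoundIdxSet in Python (with the same indices on every input admitted by Pre_);
-- the equivalence proved here is about the return value.

-- ===== PORT A =====
-- inner 'for idx in range(sourceCharIdx, len(sourceStr)): if targetChar == sourceStr[idx]: … break'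
def pvA_inner (s : List Char) (c : Char) : List Int → Option Int
  | [] => none
  | i :: rest =>
    match PySem.List.pyGet? s i with
    | none => none      -- Python raises IndexError here; excluded by Pre_
    | some ch => if c == ch then some i else pvA_inner s c rest

-- outer 'for targetChar in targetStr' carrying (sourceCharIdx, matchCnt)
def pvA_loop (s : List Char) : List Char → Int → Int → Int
  | [], _, cnt => cnt
  | c :: rest, pos, cnt =>
    match pvA_inner s c (PySem.List.pyRange pos (s.length : Int) 1) with
    | some i => pvA_loop s rest (i + 1) (cnt + 1)
    | none => pvA_loop s rest pos cnt

def subsequenceAvailable (sourceStr : String) (targetStr : String) (targetStrFoundIdxSet : List Int) (checkStartIdx : Int) : Bool :=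
  if pvA_loop sourceStr.toList targetStr.toList checkStartIdx 0 = (targetStr.toList.length : Int) then true else false

-- ===== PORT B =====
-- 'positions.setdefault(ch, []).append(i)' over enumerate(sourceStr)
def pvB_positions (s : List Char) : PySem.Dict Char (List Int) :=
  (PySem.List.enumerate s 0).foldl (fun d p => d.modify p.2 [] (fun l => l ++ [p.1])) PySem.Dict.empty

-- 'while k < len(lst) and lst[k] < pos: k += 1' — the while loop scans the list from index k
-- and stops at the first entry ≥ pos; ported structurally as the number of skipped entries of
-- the remaining list (kernel-reducible; exact: the loop advances k by exactly that count)
def pvB_skip (pos : Int) : List Int → Nat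
  | [] => 0
  | p :: rest => if p < pos then pvB_skip pos rest + 1 else 0

def pvB_adv (lst : List Int) (pos : Int) (k : Nat) : Nat :=
  k + pvB_skip pos (lst.drop k)

-- 'for c in targetStr' carrying (cursors, pos, matchCnt)
def pvB_loop (positions : PySem.Dict Char (List Int)) : List Char → PySem.Dict Char Nat → Int → Int → Int
  | [], _, _, cnt => cnt
  | c :: rest, curs, pos, cnt =>
    match positions.get? c with
    | none => pvB_loop positions rest curs pos cnt
    | some lst =>
      let k := pvB_adv lst pos (curs.getD c 0)
      if h : k < lst.length then
        pvB_loop positions rest (curs.insert c k) (lst[k] + 1) (cnt + 1)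
      else
        pvB_loop positions rest (curs.insert c k) pos cnt

def subsequenceAvailable_alt (sourceStr : String) (targetStr : String) (targetStrFoundIdxSet : List Int) (checkStartIdx : Int) : Bool :=
  decide (pvB_loop (pvB_positions sourceStr.toList) targetStr.toList PySem.Dict.empty checkStartIdx 0 = (targetStr.toList.length : Int))

-- ===== PRECONDITION & SPEC =====
-- Pre_ excludes a negative checkStartIdx with a nonempty targetStr: there A either raises
-- IndexError (checkStartIdx < -len(sourceStr)) or, via Python's negative-index wraparound,
-- scans the tail of sourceStr before rescanning the whole string — no caller-specified
-- meaning exists for a negative start position, and A's wrap-scan and B's treating it as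
-- "before the beginning" are both accidental choices on that corner.
def Pre_subsequenceAvailable (sourceStr : String) (targetStr : String) (targetStrFoundIdxSet : List Int) (checkStartIdx : Int) : Prop :=
  0 ≤ checkStartIdx ∨ targetStr.toList = []
instance (sourceStr : String) (targetStr : String) (targetStrFoundIdxSet : List Int) (checkStartIdx : Int) : Decidable (Pre_subsequenceAvailable sourceStr targetStr targetStrFoundIdxSet checkStartIdx) := by unfold Pre_subsequenceAvailable; infer_instance

def pvWitness_subsequenceAvailable : String × String × List Int × Int := ("abcab", "ab", [(0 : Int)], 1)

-- A raises IndexError whenever targetStr is nonempty and checkStartIdx < -len(sourceStr)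
-- (the first inner lookup sourceStr[checkStartIdx] is out of range); B returns the ordinary
-- subsequence answer there (the cursor lies before every occurrence).
def Raises_subsequenceAvailable (sourceStr : String) (targetStr : String) (targetStrFoundIdxSet : List Int) (checkStartIdx : Int) : Prop :=
  targetStr.toList ≠ [] ∧ checkStartIdx < -(sourceStr.toList.length : Int)
instance (sourceStr : String) (targetStr : String) (targetStrFoundIdxSet : List Int) (checkStartIdx : Int) : Decidable (Raises_subsequenceAvailable sourceStr targetStr targetStrFoundIdxSet checkStartIdx) := by unfold Raises_subsequenceAvailable; infer_instance
def pvRaiseWitness_subsequenceAvailable : String × String × List Int × Int := ("a", "a", [], -5)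
def pvRaiseWitnessOut_subsequenceAvailable : Bool := true

def Spec_subsequenceAvailable (sourceStr : String) (targetStr : String) (targetStrFoundIdxSet : List Int) (checkStartIdx : Int) (out : Bool) : Prop := out = subsequenceAvailable_alt sourceStr targetStr targetStrFoundIdxSet checkStartIdx
instance (sourceStr : String) (targetStr : String) (targetStrFoundIdxSet : List Int) (checkStartIdx : Int) (out : Bool) : Decidable (Spec_subsequenceAvailable sourceStr targetStr targetStrFoundIdxSet checkStartIdx out) := by unfold Spec_subsequenceAvailable; infer_instance

-- ===== CLAIM (what is proved, stated in full; the proofs are below) =====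
def Claim_equal_subsequenceAvailable : Prop := ∀ (sourceStr : String) (targetStr : String) (targetStrFoundIdxSet : List Int) (checkStartIdx : Int), Dom_subsequenceAvailable sourceStr targetStr targetStrFoundIdxSet checkStartIdx → Pre_subsequenceAvailable sourceStr targetStr targetStrFoundIdxSet checkStartIdx → Spec_subsequenceAvailable sourceStr targetStr targetStrFoundIdxSet checkStartIdx (subsequenceAvailable sourceStr targetStr targetStrFoundIdxSet checkStartIdx)

def Claim_raises_subsequenceAvailable : Prop := (∀ (sourceStr : String) (targetStr : String) (targetStrFoundIdxSet : List Int) (checkStartIdx : Int), Dom_subsequenceAvailable sourceStr targetStr targetStrFoundIdxSet checkStartIdx → Raises_subsequenceAvailable sourceStr targetStr targetStrFoundIdxSet checkStartIdx → ¬ Pre_subsequenceAvailable sourceStr targetStr targetStrFoundIdxSet checkStartIdx) ∧ (Dom_subsequenceAvailable (pvRaiseWitness_subsequenceAvailable.1) (pvRaiseWitness_subsequenceAvailable.2.1) (pvRaiseWitness_subsequenceAvailable.2.2.1) (pvRaiseWitness_subsequenceAvailable.2.2.2) ∧ Raises_subsequenceAvailable (pvRaiseWitness_subsequenceAvailable.1)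 (pvRaiseWitness_subsequenceAvailable.2.1) (pvRaiseWitness_subsequenceAvailable.2.2.1) (pvRaiseWitness_subsequenceAvailable.2.2.2) ∧ subsequenceAvailable_alt (pvRaiseWitness_subsequenceAvailable.1) (pvRaiseWitness_subsequenceAvailable.2.1) (pvRaiseWitness_subsequenceAvailable.2.2.1) (pvRaiseWitness_subsequenceAvailable.2.2.2) = pvRaiseWitnessOut_subsequenceAvailable)

-- ===== LEMMAS AND PROOFS =====

-- the ascending list of positions of c in s, as B's dictionary stores it
def pvPosList (s : List Char) (c : Char) : List Int :=
  ((PySem.List.enumerate s 0).filter (fun p => p.2 == c)).map (fun p => p.1)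

lemma pvB_positions_getD (s : List Char) (c : Char) :
    (pvB_positions s).getD c [] = pvPosList s c := by
  have h : pvB_positions s = ((PySem.List.enumerate s 0).map Prod.swap).foldl
      (fun d p => d.modify p.1 [] (fun l => l ++ [p.2])) PySem.Dict.empty := by
    rw [List.foldl_map]; rfl
  rw [h, PySem.Dict.getD_foldl_modify_append, PySem.Dict.getD_empty]
  simp [pvPosList, List.filter_map, List.map_map, Function.comp_def, Prod.swap]

lemma mem_pvPosList {s : List Char} {c : Char} {i : Int} :
    i ∈ pvPosList s c ↔ ∃ (k : Nat) (h : k < s.length), i = (k : Int) ∧ s[k] = c := by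
  simp only [pvPosList, List.mem_map, List.mem_filter, PySem.List.mem_enumerate_iff]
  constructor
  · rintro ⟨p, ⟨⟨k, hk, rfl⟩, hc⟩, rfl⟩
    exact ⟨k, hk, by simpa using hc⟩
  · rintro ⟨k, hk, rfl, hc⟩
    exact ⟨((k : Int), s[k]), ⟨⟨k, hk, by simp⟩, by simpa using hc⟩, rfl⟩

lemma pairwise_pvPosList (s : List Char) (c : Char) :
    (pvPosList s c).Pairwise (· < ·) := by
  have h := PySem.List.pairwise_lt_enumerate s 0
  exact List.Pairwise.map _ (fun a b hab => hab) (h.sublist List.filter_sublist)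

-- the while-loop skip count: the skipped entries are exactly those < pos, and it stops at an entry ≥ pos
lemma pvB_skip_spec (pos : Int) (l : List Int) :
    pvB_skip pos l ≤ l.length
    ∧ (∀ j (hj : j < l.length), j < pvB_skip pos l → l[j] < pos)
    ∧ (∀ (h : pvB_skip pos l < l.length), pos ≤ l[pvB_skip pos l]) := by
  induction l with
  | nil => exact ⟨by simp [pvB_skip], fun j hj => by simp at hj, fun h => by simp [pvB_skip] at h⟩
  | cons a t ih =>
    obtain ⟨h1, h2, h3⟩ := ih
    by_cases ha : a < pos
    · refine ⟨?_, ?_, ?_⟩ <;> simp only [pvB_skip, if_pos ha]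
      · simpa using h1
      · intro j hj hjs
        cases j with
        | zero => simpa using ha
        | succ j' => simpa using h2 j' (by simpa using hj) (by omega)
      · intro h
        simpa using h3 (by simpa using h)
    · refine ⟨?_, ?_, ?_⟩ <;> simp only [pvB_skip, if_neg ha]
      · simp
      · intro j hj hjs; omega
      · intro h; simpa using not_lt.mp ha

-- the while loop (cursor form): only moves forward, skips exactly the entries < pos, stops at an entry ≥ pos
lemma pvB_adv_spec (lst : List Int) (pos : Int) (k : Nat) :
      k ≤ pvB_adv lst pos k
      ∧ (∀ j, k ≤ j → j < pvB_adv lst pos k → ∀ (hj : j < lst.length), lst[j] < pos)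
      ∧ (∀ (h : pvB_adv lst pos k < lst.length), k ≤ pvB_adv lst pos k → pos ≤ lst[pvB_adv lst pos k]) := by
  obtain ⟨h1, h2, h3⟩ := pvB_skip_spec pos (lst.drop k)
  have hdl : (lst.drop k).length = lst.length - k := by simp
  refine ⟨by simp [pvB_adv], ?_, ?_⟩
  · intro j hj1 hj2 hj3
    have hjk : j - k < pvB_skip pos (lst.drop k) := by simp [pvB_adv] at hj2; omega
    have := h2 (j - k) (by omega) hjk
    rw [List.getElem_drop] at this
    have hj' : k + (j - k) = j := by omega
    simpa [hj'] using this
  · intro h _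
    have hs : pvB_skip pos (lst.drop k) < (lst.drop k).length := by
      simp only [pvB_adv] at h; omega
    have := h3 hs
    rw [List.getElem_drop] at this
    simpa [pvB_adv] using this

-- find? of the first-satisfying index: entries before m fail, the entry at m (if any) succeeds
lemma find?_eq_getElem?_of_first {l : List Int} {p : Int → Bool} {m : Nat}
    (hbefore : ∀ j (hj : j < l.length), j < m → p l[j] = false)
    (hat : ∀ (h : m < l.length), p l[m] = true) :
    l.find? p = l[m]? := by
  induction l generalizing m with
  | nil => simp
  | cons a t ih =>
    cases m with
    | zero =>
      have ha : p a = true := by simpa using hat (by simp)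
      simp [List.find?, ha]
    | succ m' =>
      have ha : p a = false := hbefore 0 (by simp) (by omega)
      simp only [List.find?, ha, List.getElem?_cons_succ]
      exact ih (fun j hj hjm => hbefore (j + 1) (by simpa using hj) (by omega))
        (fun h => hat (by simpa using h))

lemma find?_congr_mem {l : List Int} {p q : Int → Bool} (h : ∀ x ∈ l, p x = q x) :
    l.find? p = l.find? q := by
  induction l with
  | nil => rfl
  | cons a t ih =>
    have ha : p a = q a := h a List.mem_cons_self
    simp only [List.find?, ha]
    cases q a
    · exact ih (fun x hx => h x (List.mem_cons_of_mem _ hx))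
    · rfl

lemma find?_ge_self_mem {l : List Int} {pos : Int} (hs : l.Pairwise (· < ·)) (hm : pos ∈ l) :
    l.find? (fun p => decide (pos ≤ p)) = some pos := by
  induction l with
  | nil => cases hm
  | cons a t ih =>
    rcases List.mem_cons.mp hm with rfl | hm'
    · simp [List.find?]
    · have ha : a < pos := (List.pairwise_cons.mp hs).1 _ hm'
      have : decide (pos ≤ a) = false := by simp; omega
      simp only [List.find?, this]
      exact ih (List.pairwise_cons.mp hs).2 hm'

lemma pvA_inner_eq (s : List Char) (c : Char) :
    ∀ (n : Nat) (pos : Int), 0 ≤ pos → ((s.length : Int) - pos).toNat ≤ n →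
    pvA_inner s c (PySem.List.pyRange pos (s.length : Int) 1)
      = (pvPosList s c).find? (fun p => decide (pos ≤ p)) := by
  intro n
  induction n with
  | zero =>
    intro pos hpos hn
    have hle : (s.length : Int) ≤ pos := by omega
    rw [PySem.List.pyRange_one_eq_nil hle]
    have hnil : pvA_inner s c [] = none := rfl
    rw [hnil]
    symm
    rw [List.find?_eq_none]
    intro x hx
    rcases mem_pvPosList.mp hx with ⟨k, hk, rfl, _⟩
    simp; omega
  | succ n ih =>
    intro pos hpos hn
    by_cases hle : (s.length : Int) ≤ pos
    · rw [PySem.List.pyRange_one_eq_nil hle]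
      have hnil : pvA_inner s c [] = none := rfl
      rw [hnil]
      symm
      rw [List.find?_eq_none]
      intro x hx
      rcases mem_pvPosList.mp hx with ⟨k, hk, rfl, _⟩
      simp; omega
    · push Not at hle
      rw [PySem.List.pyRange_one_cons hle]
      have hkn : pos.toNat < s.length := by omega
      have hget : PySem.List.pyGet? s pos = s[pos.toNat]? :=
        PySem.List.pyGet?_of_nonneg_of_lt s hpos hle
      rw [List.getElem?_eq_getElem hkn] at hget
      show (match PySem.List.pyGet? s pos with
            | none => none
            | some ch => if c == ch then some pos else pvA_inner s c (PySem.List.pyRange (pos+1) (s.length : Int) 1))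
          = _
      rw [hget]
      have hred : (match some s[pos.toNat] with
            | none => none
            | some ch => if c == ch then some pos else pvA_inner s c (PySem.List.pyRange (pos+1) (s.length : Int) 1))
          = (if c == s[pos.toNat] then some pos else pvA_inner s c (PySem.List.pyRange (pos+1) (s.length : Int) 1)) := rfl
      rw [hred]
      by_cases hc : c = s[pos.toNat]
      · have hbeq : (c == s[pos.toNat]) = true := by simpa using hc
        rw [hbeq, if_pos rfl]
        symm
        exact find?_ge_self_mem (pairwise_pvPosList s c)
          (mem_pvPosList.mpr ⟨pos.toNat, hkn, by omega, hc.symm⟩)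
      · have hbeq : (c == s[pos.toNat]) = false := by simpa using hc
        rw [hbeq, if_neg Bool.false_ne_true]
        have hnot : pos ∉ pvPosList s c := by
          intro hmem
          rcases mem_pvPosList.mp hmem with ⟨k, hk, hpk, hck⟩
          have : k = pos.toNat := by omega
          exact hc (this ▸ hck.symm)
        rw [ih (pos + 1) (by omega) (by omega)]
        apply find?_congr_mem
        intro x hx
        have : x ≠ pos := fun h => hnot (h ▸ hx)
        simp; omega

lemma pv_loop_eq (s : List Char) (ts : List Char) :
    ∀ (curs : PySem.Dict Char Nat) (pos cnt : Int), 0 ≤ pos →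
      (∀ c j (hj : j < (pvPosList s c).length), j < curs.getD c 0 → (pvPosList s c)[j] < pos) →
      pvA_loop s ts pos cnt = pvB_loop (pvB_positions s) ts curs pos cnt := by
  induction ts with
  | nil => intro curs pos cnt _ _; rfl
  | cons c rest ih =>
    intro curs pos cnt hpos hinv
    have hA : pvA_loop s (c :: rest) pos cnt
        = (match (pvPosList s c).find? (fun p => decide (pos ≤ p)) with
           | some i => pvA_loop s rest (i + 1) (cnt + 1)
           | none => pvA_loop s rest pos cnt) := by
      show (match pvA_inner s c (PySem.List.pyRange pos (s.length : Int) 1) with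
            | some i => pvA_loop s rest (i + 1) (cnt + 1)
            | none => pvA_loop s rest pos cnt) = _
      rw [pvA_inner_eq s c ((s.length : Int) - pos).toNat pos hpos (le_refl _)]
    rw [hA]
    cases hget : (pvB_positions s).get? c with
    | none =>
      have hnil : pvPosList s c = [] := by
        rw [← pvB_positions_getD s c, PySem.Dict.getD_eq_get?_getD, hget]; rfl
      have hB : pvB_loop (pvB_positions s) (c :: rest) curs pos cnt
          = pvB_loop (pvB_positions s) rest curs pos cnt := by
        show (match (pvB_positions s).get? c with
              | none => pvB_loop (pvB_positions s) rest curs pos cnt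
              | some lst =>
                let k := pvB_adv lst pos (curs.getD c 0)
                if h : k < lst.length then
                  pvB_loop (pvB_positions s) rest (curs.insert c k) (lst[k] + 1) (cnt + 1)
                else
                  pvB_loop (pvB_positions s) rest (curs.insert c k) pos cnt) = _
        rw [hget]
      rw [hB, hnil]
      exact ih curs pos cnt hpos hinv
    | some lst =>
      have hlst : lst = pvPosList s c := by
        rw [← pvB_positions_getD s c, PySem.Dict.getD_eq_get?_getD, hget]; rfl
      subst hlst
      obtain ⟨hge, hskip, hstop⟩ :=
        pvB_adv_spec (pvPosList s c) pos (curs.getD c 0)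
      have hfind : (pvPosList s c).find? (fun p => decide (pos ≤ p))
          = (pvPosList s c)[pvB_adv (pvPosList s c) pos (curs.getD c 0)]? := by
        apply find?_eq_getElem?_of_first
        · intro j hj hjm
          by_cases hj0 : j < curs.getD c 0
          · have := hinv c j hj hj0
            simp; omega
          · have := hskip j (by omega) hjm hj
            simp; omega
        · intro h
          simpa using hstop h hge
      have hB : pvB_loop (pvB_positions s) (c :: rest) curs pos cnt
          = (if h : pvB_adv (pvPosList s c) pos (curs.getD c 0) < (pvPosList s c).length then
              pvB_loop (pvB_positions s) rest (curs.insert c (pvB_adv (pvPosList s c) pos (curs.getD c 0)))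
                ((pvPosList s c)[pvB_adv (pvPosList s c) pos (curs.getD c 0)] + 1) (cnt + 1)
            else
              pvB_loop (pvB_positions s) rest (curs.insert c (pvB_adv (pvPosList s c) pos (curs.getD c 0))) pos cnt) := by
        show (match (pvB_positions s).get? c with
              | none => pvB_loop (pvB_positions s) rest curs pos cnt
              | some lst =>
                let k := pvB_adv lst pos (curs.getD c 0)
                if h : k < lst.length then
                  pvB_loop (pvB_positions s) rest (curs.insert c k) (lst[k] + 1) (cnt + 1)
                else
                  pvB_loop (pvB_positions s) rest (curs.insert c k) pos cnt) = _
        rw [hget]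
      rw [hB]
      by_cases h : pvB_adv (pvPosList s c) pos (curs.getD c 0) < (pvPosList s c).length
      · rw [dif_pos h, hfind, List.getElem?_eq_getElem h]
        have hple : pos ≤ (pvPosList s c)[pvB_adv (pvPosList s c) pos (curs.getD c 0)] := hstop h hge
        apply ih _ _ _ (by omega)
        intro c' j hj hjc
        by_cases hc' : c' = c
        · subst hc'
          rw [PySem.Dict.getD_insert_self] at hjc
          by_cases hj0 : j < curs.getD c' 0
          · have := hinv c' j hj hj0
            omega
          · have := hskip j (by omega) hjc hj
            omega
        · rw [PySem.Dict.getD_insert_of_ne curs _ _ hc'] at hjc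
          have := hinv c' j hj hjc
          omega
      · rw [dif_neg h, hfind, List.getElem?_eq_none (by omega)]
        apply ih _ _ _ hpos
        intro c' j hj hjc
        by_cases hc' : c' = c
        · subst hc'
          rw [PySem.Dict.getD_insert_self] at hjc
          by_cases hj0 : j < curs.getD c' 0
          · exact hinv c' j hj hj0
          · exact hskip j (by omega) hjc hj
        · rw [PySem.Dict.getD_insert_of_ne curs _ _ hc'] at hjc
          exact hinv c' j hj hjc

-- ===== VERDICT (by name: the statement is the Claim_ definition above) =====
theorem subsequenceAvailable_spec : Claim_equal_subsequenceAvailable := by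
  intro sourceStr targetStr targetStrFoundIdxSet checkStartIdx _ hpre
  unfold Spec_subsequenceAvailable subsequenceAvailable subsequenceAvailable_alt
  rcases hpre with h0 | hnil
  · rw [pv_loop_eq sourceStr.toList targetStr.toList PySem.Dict.empty checkStartIdx 0 h0
        (by intro c j hj hjc; rw [PySem.Dict.getD_empty] at hjc; omega)]
    by_cases h : pvB_loop (pvB_positions sourceStr.toList) targetStr.toList PySem.Dict.empty checkStartIdx 0 = (targetStr.toList.length : Int) <;> simp [h]
  · rw [hnil]
    simp [pvA_loop, pvB_loop]

theorem subsequenceAvailable_raises : Claim_raises_subsequenceAvailable := by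
  unfold Claim_raises_subsequenceAvailable
  constructor
  · intro sourceStr targetStr targetStrFoundIdxSet checkStartIdx _ hr hpre
    rcases hr with ⟨hne, hlt⟩
    rcases hpre with h0 | hnil
    · omega
    · exact hne hnil
  · decide

-- self-check that B's port indeed returns pvRaiseWitnessOut_ at the raise witness (reuses subsequenceAvailable_raises)
theorem pvRaises_subsequenceAvailable_ok :
    subsequenceAvailable_alt (pvRaiseWitness_subsequenceAvailable.1) (pvRaiseWitness_subsequenceAvailable.2.1) (pvRaiseWitness_subsequenceAvailable.2.2.1) (pvRaiseWitness_subsequenceAvailable.2.2.2) = pvRaiseWitnessOut_subsequenceAvailable :=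
  subsequenceAvailable_raises.2.2.2
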